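-- pv_equiv track=rewrite | github.com/axiomiety/crashburn | sudoku.py | boardChunks
-- ===== SOURCE A (Python) =====
-- import math
--
-- def boardChunks(board):
--     chunks = []
--     n = len(board)
--     chunkSize = int(math.sqrt(n))
--     for r in range(chunkSize):
--         rows = board[r*chunkSize:(r+1)*chunkSize]
--         for c in range(chunkSize):
--             chunk = []
--             for rr in rows:
--                 chunk.extend(rr[c*chunkSize:(c+1)*chunkSize])
--             chunks.append(chunk)
--
--     return chunks
-- ===== SOURCE B (Python) =====
-- import math
--
-- def boardChunks(board):
--     cs = math.isqrt(len(board))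
--     chunks = [[] for _ in range(cs * cs)]
--     for ri, row in enumerate(board[:cs * cs]):
--         base = (ri // cs) * cs
--         for c in range(cs):
--             chunks[base + c].extend(row[c * cs:(c + 1) * cs])
--     return chunks
-- ===== Notes on version B (the rewrite author's own statement) =====
-- stated objective: alternative
-- what changed: B replaces A's block-by-block gather (nested loops re-slicing the row group for every block) by a single row-major scatter pass: preallocate cs*cs empty buckets and, for each row, extend the cs buckets of its block-row with the row's block-column slices.
import Mathlib
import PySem

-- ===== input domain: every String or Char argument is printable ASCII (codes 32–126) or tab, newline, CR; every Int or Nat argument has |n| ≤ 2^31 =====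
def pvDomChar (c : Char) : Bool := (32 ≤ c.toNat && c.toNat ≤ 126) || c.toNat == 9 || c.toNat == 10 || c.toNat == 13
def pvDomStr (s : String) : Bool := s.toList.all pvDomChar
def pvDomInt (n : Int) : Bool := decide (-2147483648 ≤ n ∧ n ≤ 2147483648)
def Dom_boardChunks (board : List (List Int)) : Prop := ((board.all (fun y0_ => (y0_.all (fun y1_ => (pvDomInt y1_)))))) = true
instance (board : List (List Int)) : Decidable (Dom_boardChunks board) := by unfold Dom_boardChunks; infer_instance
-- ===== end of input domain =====

-- B replaces A's block-by-block gather by a single row-major scatter pass into preallocated buckets (objective: alternative decomposition, same cost).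
-- int(math.sqrt(n)) (A) and math.isqrt(n) (B) are both ported as Nat.sqrt; they agree for every feasible list length (n < 2^52).

-- ===== PORT A =====
def boardChunks (board : List (List Int)) : List (List Int) :=
  let n := board.length
  let chunkSize := Nat.sqrt n
  (List.range chunkSize).foldl (fun chunks r =>
    let rows := PySem.List.slice board (some ((r * chunkSize : Nat) : Int)) (some (((r + 1) * chunkSize : Nat) : Int))
    (List.range chunkSize).foldl (fun chunks c =>
      let chunk := rows.foldl (fun chunk rr =>
        chunk ++ PySem.List.slice rr (some ((c * chunkSize : Nat) : Int)) (some (((c + 1) * chunkSize : Nat) : Int))) []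
      chunks ++ [chunk]) chunks) []

-- ===== PORT B =====
-- chunks[base + c].extend(...): the index base + c is provably ≥ 0 on every iteration
-- (enumerate indices start at 0), so `.toNat` is exact here.
def boardChunks_alt (board : List (List Int)) : List (List Int) :=
  let cs := Nat.sqrt board.length
  let chunks := (List.range (cs * cs)).map (fun _ => ([] : List Int))
  (PySem.List.enumerate (PySem.List.slice board none (some ((cs * cs : Nat) : Int))) 0).foldl
    (fun ch p =>
      let base := PySem.Int.floordiv p.1 (cs : Int) * (cs : Int)
      (List.range cs).foldl
        (fun ch (c : Nat) => ch.modify (base + (c : Int)).toNat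
          (· ++ PySem.List.slice p.2 (some ((c * cs : Nat) : Int)) (some (((c + 1) * cs : Nat) : Int)))) ch)
    chunks

-- ===== PRECONDITION & SPEC =====
def Spec_boardChunks (board : List (List Int)) (out : List (List Int)) : Prop := out = boardChunks_alt board
instance (board : List (List Int)) (out : List (List Int)) : Decidable (Spec_boardChunks board out) := by unfold Spec_boardChunks; infer_instance

-- ===== CLAIM (what is proved, stated in full; the proofs are below) =====
def Claim_equal_boardChunks : Prop := ∀ (board : List (List Int)), Dom_boardChunks board → Spec_boardChunks board (boardChunks board)

-- ===== LEMMAS AND PROOFS =====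

-- the block-column slice of one row
def colS (cs c : Nat) (rr : List Int) : List Int := (rr.drop (c * cs)).take cs

-- block (r, c) gathered from a row list L
def blockOf (cs : Nat) (L : List (List Int)) (r c : Nat) : List Int :=
  ((L.drop (r * cs)).take cs).flatMap (colS cs c)

-- the common closed form: g block-rows of cs blocks each
def gather (cs g : Nat) (L : List (List Int)) : List (List Int) :=
  (List.range g).flatMap (fun r => (List.range cs).map (fun c => blockOf cs L r c))

-- B's per-row scatter step, on Nat indices
def stepB (cs : Nat) (ch : List (List Int)) (k : Nat) (row : List Int) : List (List Int) :=
  (List.range cs).foldl (fun ch c => ch.modify (k / cs * cs + c) (fun x => x ++ colS cs c row)) ch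

-- B's scatter loop, on Nat indices
def scat (cs : Nat) : Nat → List (List Int) → List (List Int) → List (List Int)
  | _, [], ch => ch
  | k, row :: L, ch => scat cs (k + 1) L (stepB cs ch k row)

lemma modify_append_cons {α : Type} (l t : List α) (x : α) (g : α → α) :
    (l ++ x :: t).modify l.length g = l ++ g x :: t := by
  induction l with
  | nil => simp [List.modify]
  | cons a l ih => simpa [List.modify] using ih

lemma mapIdx_id {α : Type} (l : List α) : List.mapIdx (fun _ x => x) l = l := by
  induction l with
  | nil => rfl
  | cons a l ih => simpa [List.mapIdx_cons] using ih

lemma mapIdx_replicate {α β : Type} (f : Nat → α → β) : ∀ (n : Nat) (a : α),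
    (List.replicate n a).mapIdx f = (List.range n).map (fun i => f i a) := by
  intro n
  induction n generalizing f with
  | zero => intro a; rfl
  | succ n ih =>
    intro a
    rw [List.replicate_succ, List.mapIdx_cons, List.range_succ_eq_map, List.map_cons,
      List.map_map, ih]
    simp [Function.comp_def]

-- one row scattered across a contiguous run of buckets
lemma modfold {mid : List (List Int)} : ∀ (done rest : List (List Int)) (f : Nat → List Int),
    (List.range mid.length).foldl
      (fun ch c => ch.modify (done.length + c) (fun x => x ++ f c)) (done ++ (mid ++ rest))
    = done ++ (mid.mapIdx (fun c x => x ++ f c) ++ rest) := by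
  induction mid with
  | nil => intro done rest f; simp
  | cons x mid ih =>
    intro done rest f
    rw [List.length_cons, List.range_succ_eq_map, List.foldl_cons, List.foldl_map]
    have h0 : (done ++ (x :: mid ++ rest)).modify (done.length + 0) (fun y => y ++ f 0)
        = (done ++ [x ++ f 0]) ++ (mid ++ rest) := by
      simpa using modify_append_cons done (mid ++ rest) x (fun y => y ++ f 0)
    rw [h0]
    have hfun : (fun (ch : List (List Int)) (c : Nat) =>
          ch.modify (done.length + Nat.succ c) (fun y => y ++ f (Nat.succ c)))
        = (fun ch c => ch.modify ((done ++ [x ++ f 0]).length + c) (fun y => y ++ f (c + 1))) := by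
      funext ch c
      have : done.length + Nat.succ c = (done ++ [x ++ f 0]).length + c := by
        simp; omega
      rw [this, Nat.succ_eq_add_one]
    rw [hfun, ih (done ++ [x ++ f 0]) rest (fun c => f (c + 1))]
    simp [List.mapIdx_cons]

-- scat splits over list append
lemma scat_append (cs : Nat) : ∀ (G L : List (List Int)) (k : Nat) (ch : List (List Int)),
    scat cs k (G ++ L) ch = scat cs (k + G.length) L (scat cs k G ch) := by
  intro G
  induction G with
  | nil => intro L k ch; simp [scat]
  | cons g G ih =>
    intro L k ch
    show scat cs (k + 1) (G ++ L) (stepB cs ch k g) = _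
    rw [ih]
    congr 1
    simp
    omega

-- scattering one block-row's group of rows
lemma group_spec (cs : Nat) : ∀ (G : List (List Int)) (a j : Nat)
    (done mid rest : List (List Int)),
    done.length = a * cs → mid.length = cs → j + G.length ≤ cs →
    scat cs (a * cs + j) G (done ++ (mid ++ rest))
    = done ++ (mid.mapIdx (fun c x => x ++ G.flatMap (colS cs c)) ++ rest) := by
  intro G
  induction G with
  | nil =>
    intro a j done mid rest hd hm hj
    show done ++ (mid ++ rest) = _
    have : (fun (c : Nat) (x : List Int) => x ++ List.flatMap (colS cs c) []) =
        fun _ x => x := by funext c x; simp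
    rw [this, mapIdx_id]
  | cons row G ih =>
    intro a j done mid rest hd hm hj
    have hjc : j < cs := by simp at hj; omega
    have hdiv : (a * cs + j) / cs = a := by
      rw [show a * cs + j = j + cs * a by ring, Nat.add_mul_div_left _ _ (by omega : 0 < cs)]
      simp [Nat.div_eq_of_lt hjc]
    show scat cs (a * cs + j + 1) G (stepB cs (done ++ (mid ++ rest)) (a * cs + j) row) = _
    have hstep : stepB cs (done ++ (mid ++ rest)) (a * cs + j) row
        = done ++ (mid.mapIdx (fun c x => x ++ colS cs c row) ++ rest) := by
      unfold stepB
      rw [hdiv]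
      have := modfold (mid := mid) done rest (fun c => colS cs c row)
      rw [hm, hd] at this
      exact this
    rw [hstep, show a * cs + j + 1 = a * cs + (j + 1) by omega,
      ih a (j + 1) done _ rest hd (by simp [hm]) (by simp at hj ⊢; omega),
      List.mapIdx_mapIdx]
    have : (fun i => (fun x => x ++ List.flatMap (colS cs i) G) ∘ fun x => x ++ colS cs i row)
        = (fun c (x : List Int) => x ++ List.flatMap (colS cs c) (row :: G)) := by
      funext c x
      simp [List.flatMap_cons]
    rw [this]

-- blocks shift down one block-row when the first row group is dropped
lemma blockOf_succ (cs : Nat) (L : List (List Int)) (r c : Nat) :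
    blockOf cs L (r + 1) c = blockOf cs (L.drop cs) r c := by
  unfold blockOf
  rw [List.drop_drop]
  congr 2
  ring

-- main scatter lemma: B's loop computes the gather closed form
lemma scat_gather (cs : Nat) : ∀ (g a : Nat) (L done : List (List Int)),
    L.length = g * cs → done.length = a * cs →
    scat cs (a * cs) L (done ++ List.replicate (g * cs) ([] : List Int))
    = done ++ gather cs g L := by
  intro g
  induction g with
  | zero =>
    intro a L done hL hd
    have : L = [] := List.eq_nil_of_length_eq_zero (by simpa using hL)
    subst this
    simp [scat, gather]
  | succ g ih =>
    intro a L done hL hd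
    rcases Nat.eq_zero_or_pos cs with hcs | hcs
    · subst hcs
      have : L = [] := List.eq_nil_of_length_eq_zero (by simpa using hL)
      subst this
      simp [scat, gather]
    · have hlen : (L.take cs).length = cs := by
        rw [List.length_take, hL, min_eq_left (Nat.le_mul_of_pos_left cs (by omega))]
      conv_lhs => rw [← List.take_append_drop cs L,
        show (g + 1) * cs = cs + g * cs by ring, List.replicate_add]
      rw [scat_append]
      have hg := group_spec cs (L.take cs) a 0 done (List.replicate cs [])
        (List.replicate (g * cs) []) hd (by simp) (by simp [hlen])
      simp only [Nat.add_zero] at hg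
      rw [hg, hlen, mapIdx_replicate, ← List.append_assoc,
        show a * cs + cs = (a + 1) * cs by ring]
      rw [ih (a + 1) (L.drop cs) _
        (by rw [List.length_drop, hL, Nat.add_mul, one_mul, Nat.add_sub_cancel])
        (by rw [List.length_append, List.length_map, List.length_range, hd]; ring)]
      rw [List.append_assoc]
      congr 1
      show _ = gather cs (g + 1) L
      unfold gather
      rw [List.range_succ_eq_map, List.flatMap_cons, List.flatMap_map]
      congr 1
      · apply List.map_congr_left
        intro c _
        simp [blockOf]
      · apply List.flatMap_congr
        intro r _
        apply List.map_congr_left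
        intro c _
        exact (blockOf_succ cs L r c).symm

-- A's nested gather loops in closed form
lemma foldl_foldl_append (cs : Nat) (F : Nat → Nat → List Int) :
    ∀ (l : List Nat) (init : List (List Int)),
    l.foldl (fun chunks r => (List.range cs).foldl (fun ch c => ch ++ [F r c]) chunks) init
    = init ++ l.flatMap (fun r => (List.range cs).map (F r)) := by
  intro l
  induction l with
  | nil => intro init; simp
  | cons r l ih =>
    intro init
    rw [List.foldl_cons, PySem.List.foldl_append_singleton_eq_map, ih, List.flatMap_cons,
      List.append_assoc]

lemma A_eq_gather (board : List (List Int)) :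
    boardChunks board = gather (Nat.sqrt board.length) (Nat.sqrt board.length) board := by
  simp only [boardChunks]
  rw [foldl_foldl_append (Nat.sqrt board.length)
    (fun r c => (PySem.List.slice board (some ((r * Nat.sqrt board.length : Nat) : Int))
        (some (((r + 1) * Nat.sqrt board.length : Nat) : Int))).foldl
      (fun chunk rr => chunk ++ PySem.List.slice rr (some ((c * Nat.sqrt board.length : Nat) : Int))
        (some (((c + 1) * Nat.sqrt board.length : Nat) : Int))) []),
    List.nil_append]
  unfold gather
  apply List.flatMap_congr
  intro r _
  apply List.map_congr_left
  intro c _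
  rw [PySem.List.foldl_append_eq_flatMap, List.nil_append, PySem.List.slice_natCast,
    show (r + 1) * Nat.sqrt board.length - r * Nat.sqrt board.length = Nat.sqrt board.length by
      have : (r + 1) * Nat.sqrt board.length = r * Nat.sqrt board.length + Nat.sqrt board.length := by ring
      omega]
  unfold blockOf
  congr 1
  funext rr
  rw [PySem.List.slice_natCast,
    show (c + 1) * Nat.sqrt board.length - c * Nat.sqrt board.length = Nat.sqrt board.length by
      have : (c + 1) * Nat.sqrt board.length = c * Nat.sqrt board.length + Nat.sqrt board.length := by ring
      omega]
  rfl

-- B's enumerate fold is the Nat-indexed scatter loop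
lemma enum_scat (cs : Nat) : ∀ (L : List (List Int)) (k : Nat) (ch : List (List Int)),
    (PySem.List.enumerate L (k : Int)).foldl
      (fun ch p =>
        (List.range cs).foldl
          (fun ch (c : Nat) => ch.modify (PySem.Int.floordiv p.1 (cs : Int) * (cs : Int) + (c : Int)).toNat
            (· ++ PySem.List.slice p.2 (some ((c * cs : Nat) : Int)) (some (((c + 1) * cs : Nat) : Int)))) ch) ch
    = scat cs k L ch := by
  intro L
  induction L with
  | nil => intro k ch; rw [PySem.List.enumerate_nil]; rfl
  | cons row L ih =>
    intro k ch
    rw [PySem.List.enumerate_cons, List.foldl_cons,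
      show ((k : Int) + 1) = ((k + 1 : Nat) : Int) by push_cast; ring, ih]
    show scat cs (k + 1) L _ = scat cs (k + 1) L (stepB cs ch k row)
    congr 1
    unfold stepB
    congr 1
    funext ch c
    rw [PySem.Int.floordiv_natCast,
      show ((k / cs : Nat) : Int) * (cs : Int) + (c : Int) = ((k / cs * cs + c : Nat) : Int) by push_cast; ring,
      Int.toNat_natCast]
    congr 1
    funext x
    rw [PySem.List.slice_natCast,
      show (c + 1) * cs - c * cs = cs by
        have : (c + 1) * cs = c * cs + cs := by ring
        omega]
    rfl

lemma B_eq_gather (board : List (List Int)) :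
    boardChunks_alt board = gather (Nat.sqrt board.length) (Nat.sqrt board.length) board := by
  simp only [boardChunks_alt]
  rw [PySem.List.slice_to_natCast, List.map_const', List.length_range]
  have he := enum_scat (Nat.sqrt board.length)
    (board.take (Nat.sqrt board.length * Nat.sqrt board.length)) 0
    (List.replicate (Nat.sqrt board.length * Nat.sqrt board.length) [])
  simp only [Nat.cast_zero] at he
  rw [he]
  have htake : (board.take (Nat.sqrt board.length * Nat.sqrt board.length)).length
      = Nat.sqrt board.length * Nat.sqrt board.length := by
    rw [List.length_take, min_eq_left (Nat.sqrt_le board.length)]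
  have := scat_gather (Nat.sqrt board.length) (Nat.sqrt board.length) 0
    (board.take (Nat.sqrt board.length * Nat.sqrt board.length)) [] htake (by simp)
  simp only [Nat.zero_mul, List.nil_append] at this
  rw [this]
  unfold gather
  apply List.flatMap_congr
  intro r hr
  apply List.map_congr_left
  intro c _
  unfold blockOf
  rw [List.mem_range] at hr
  have h1 : (r + 1) * Nat.sqrt board.length ≤ Nat.sqrt board.length * Nat.sqrt board.length :=
    Nat.mul_le_mul_right _ (by omega)
  have h2 : (r + 1) * Nat.sqrt board.length = r * Nat.sqrt board.length + Nat.sqrt board.length := by ring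
  rw [List.drop_take, List.take_take,
    min_eq_left (Nat.le_sub_of_add_le (by rw [Nat.add_comm, ← h2]; exact h1))]

-- ===== VERDICT (by name: the statement is the Claim_ definition above) =====
theorem boardChunks_spec : Claim_equal_boardChunks := by
  intro board _
  unfold Spec_boardChunks
  rw [A_eq_gather, B_eq_gather]
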